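-- pv_equiv track=rewrite | github.com/Admiral-Enigma/matterport-dl-improved | matterport_dl.py | _get_skybox_resolution
-- ===== SOURCE A (Python) =====
-- def _get_skybox_resolution(catalog):
--     for item in catalog:
--         if (
--             "/4k/" in item
--             and "jpg" in item
--             and "skybox" in item
--             and not any(x in item for x in ["dds", "zip", "lased"])
--         ):
--             return "/4k/"
--
--     for item in catalog:
--         if (
--             "/2k/" in item
--             and "jpg" in item
--             and "skybox" in item
--             and not any(x in item for x in ["dds", "zip", "lased"])
--         ):
--             return "/2k/"
--
--     return "/high/"
-- ===== SOURCE B (Python) =====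
-- def _get_skybox_resolution(catalog):
--     def usable(item):
--         return (
--             "jpg" in item
--             and "skybox" in item
--             and not any(x in item for x in ["dds", "zip", "lased"])
--         )
--
--     found_4k = False
--     found_2k = False
--     for item in catalog:
--         if usable(item):
--             if "/4k/" in item:
--                 found_4k = True
--             elif "/2k/" in item:
--                 found_2k = True
--     if found_4k:
--         return "/4k/"
--     if found_2k:
--         return "/2k/"
--     return "/high/"
-- ===== Notes on version B (the rewrite author's own statement) =====
-- stated objective: alternative
-- what changed: Replaces A's two sequential early-return scans of the catalog by one single pass that accumulates two booleans (4k seen / 2k seen) behind a shared usability predicate, deciding the result after the loop.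
import Mathlib
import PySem

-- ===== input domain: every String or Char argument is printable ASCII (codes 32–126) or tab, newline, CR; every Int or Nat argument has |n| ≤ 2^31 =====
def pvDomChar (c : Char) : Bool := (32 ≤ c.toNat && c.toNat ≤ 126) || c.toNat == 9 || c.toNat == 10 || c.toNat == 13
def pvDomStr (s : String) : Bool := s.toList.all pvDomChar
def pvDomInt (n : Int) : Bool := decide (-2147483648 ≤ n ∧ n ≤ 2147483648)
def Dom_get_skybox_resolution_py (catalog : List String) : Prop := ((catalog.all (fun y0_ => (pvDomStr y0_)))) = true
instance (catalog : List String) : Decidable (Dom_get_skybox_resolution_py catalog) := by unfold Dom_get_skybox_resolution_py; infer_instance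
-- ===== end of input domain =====

-- B does one pass over the catalog with two accumulated flags instead of A's two sequential scans (objective: alternative decomposition).

-- ===== PORT A =====
-- first 'for' loop of A: early return "/4k/" on a matching item
def pvALoop4k : List String → Option String
  | [] => none
  | item :: rest =>
    if PySem.Str.isIn "/4k/" item && PySem.Str.isIn "jpg" item && PySem.Str.isIn "skybox" item
        && !(["dds", "zip", "lased"].any (fun x => PySem.Str.isIn x item)) then
      some "/4k/"
    else pvALoop4k rest

-- second 'for' loop of A: early return "/2k/" on a matching item
def pvALoop2k : List String → Option String
  | [] => none
  | item :: rest =>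
    if PySem.Str.isIn "/2k/" item && PySem.Str.isIn "jpg" item && PySem.Str.isIn "skybox" item
        && !(["dds", "zip", "lased"].any (fun x => PySem.Str.isIn x item)) then
      some "/2k/"
    else pvALoop2k rest

def get_skybox_resolution_py (catalog : List String) : String :=
  match pvALoop4k catalog with
  | some r => r
  | none =>
    match pvALoop2k catalog with
    | some r => r
    | none => "/high/"

-- ===== PORT B =====
-- B's helper 'usable'
def pvUsable (item : String) : Bool :=
  PySem.Str.isIn "jpg" item && PySem.Str.isIn "skybox" item
    && !(["dds", "zip", "lased"].any (fun x => PySem.Str.isIn x item))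

-- B's single loop body: update (found_4k, found_2k)
def pvBStep (st : Bool × Bool) (item : String) : Bool × Bool :=
  if pvUsable item then
    if PySem.Str.isIn "/4k/" item then (true, st.2)
    else if PySem.Str.isIn "/2k/" item then (st.1, true)
    else st
  else st

def get_skybox_resolution_py_alt (catalog : List String) : String :=
  let st := catalog.foldl pvBStep (false, false)
  if st.1 then "/4k/" else if st.2 then "/2k/" else "/high/"

-- ===== PRECONDITION & SPEC =====
def Spec_get_skybox_resolution_py (catalog : List String) (out : String) : Prop := out = get_skybox_resolution_py_alt catalog
instance (catalog : List String) (out : String) : Decidable (Spec_get_skybox_resolution_py catalog out) := by unfold Spec_get_skybox_resolution_py; infer_instance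

-- ===== CLAIM (what is proved, stated in full; the proofs are below) =====
def Claim_equal_get_skybox_resolution_py : Prop := ∀ (catalog : List String), Dom_get_skybox_resolution_py catalog → Spec_get_skybox_resolution_py catalog (get_skybox_resolution_py catalog)

-- ===== LEMMAS AND PROOFS =====

-- A's per-item 4k condition equals B's shared predicate plus the "/4k/" test (Bool reordering)
theorem pvCond4_eq (item : String) :
    (PySem.Str.isIn "/4k/" item && PySem.Str.isIn "jpg" item && PySem.Str.isIn "skybox" item
        && !(["dds", "zip", "lased"].any (fun x => PySem.Str.isIn x item)))
      = (pvUsable item && PySem.Str.isIn "/4k/" item) := by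
  simp only [pvUsable]
  cases PySem.Str.isIn "/4k/" item <;> cases PySem.Str.isIn "jpg" item <;>
    cases PySem.Str.isIn "skybox" item <;>
    cases (["dds", "zip", "lased"].any (fun x => PySem.Str.isIn x item)) <;> rfl

-- A's per-item 2k condition likewise
theorem pvCond2_eq (item : String) :
    (PySem.Str.isIn "/2k/" item && PySem.Str.isIn "jpg" item && PySem.Str.isIn "skybox" item
        && !(["dds", "zip", "lased"].any (fun x => PySem.Str.isIn x item)))
      = (pvUsable item && PySem.Str.isIn "/2k/" item) := by
  simp only [pvUsable]
  cases PySem.Str.isIn "/2k/" item <;> cases PySem.Str.isIn "jpg" item <;>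
    cases PySem.Str.isIn "skybox" item <;>
    cases (["dds", "zip", "lased"].any (fun x => PySem.Str.isIn x item)) <;> rfl

-- characterisation of A's first loop
theorem pvALoop4k_eq (c : List String) :
    pvALoop4k c = if c.any (fun item => pvUsable item && PySem.Str.isIn "/4k/" item) then some "/4k/" else none := by
  induction c with
  | nil => rfl
  | cons item rest ih =>
    rw [pvALoop4k, pvCond4_eq, ih]
    simp only [List.any_cons, Bool.or_eq_true]
    split_ifs <;> tauto

-- characterisation of A's second loop
theorem pvALoop2k_eq (c : List String) :
    pvALoop2k c = if c.any (fun item => pvUsable item && PySem.Str.isIn "/2k/" item) then some "/2k/" else none := by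
  induction c with
  | nil => rfl
  | cons item rest ih =>
    rw [pvALoop2k, pvCond2_eq, ih]
    simp only [List.any_cons, Bool.or_eq_true]
    split_ifs <;> tauto

-- characterisation of B's single pass
theorem pvBFold_eq (c : List String) (st : Bool × Bool) :
    c.foldl pvBStep st =
      (st.1 || c.any (fun item => pvUsable item && PySem.Str.isIn "/4k/" item),
       st.2 || c.any (fun item => pvUsable item && !PySem.Str.isIn "/4k/" item && PySem.Str.isIn "/2k/" item)) := by
  induction c generalizing st with
  | nil => simp
  | cons item rest ih =>
    simp only [List.foldl_cons, List.any_cons, ih, pvBStep]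
    cases hu : pvUsable item <;>
      cases h4 : PySem.Str.isIn "/4k/" item <;>
      cases h2 : PySem.Str.isIn "/2k/" item <;>
      simp

-- if no item matches the 4k condition, A's 2k scan and B's guarded 2k flag agree
theorem pv2k_agree (c : List String)
    (h : c.any (fun item => pvUsable item && PySem.Str.isIn "/4k/" item) = false) :
    c.any (fun item => pvUsable item && PySem.Str.isIn "/2k/" item)
      = c.any (fun item => pvUsable item && !PySem.Str.isIn "/4k/" item && PySem.Str.isIn "/2k/" item) := by
  induction c with
  | nil => rfl
  | cons item rest ih =>
    simp only [List.any_cons, Bool.or_eq_false_iff] at h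
    rw [List.any_cons, List.any_cons, ih h.2]
    have h1 := h.1
    cases hu : pvUsable item <;> cases h4 : PySem.Str.isIn "/4k/" item <;> simp_all

-- ===== VERDICT (by name: the statement is the Claim_ definition above) =====
theorem get_skybox_resolution_py_spec : Claim_equal_get_skybox_resolution_py := by
  intro catalog _
  show get_skybox_resolution_py catalog = get_skybox_resolution_py_alt catalog
  unfold get_skybox_resolution_py get_skybox_resolution_py_alt
  rw [pvALoop4k_eq, pvALoop2k_eq, pvBFold_eq]
  cases h4 : catalog.any (fun item => pvUsable item && PySem.Str.isIn "/4k/" item)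
  · rw [← pv2k_agree catalog h4]
    cases h2 : catalog.any (fun item => pvUsable item && PySem.Str.isIn "/2k/" item) <;> simp
  · simp
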